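-- pv_equiv track=rewrite | github.com/JakubBlaha/Marvin | src/message_fixer.py | fix_content
-- ===== SOURCE A (Python) =====
-- CHARS: dict = {
--     '2': 'ě',
--     '3': 'š',
--     '4': 'č',
--     '5': 'ř',
--     '6': 'ž',
--     '7': 'ý',
--     '8': 'á',
--     '9': 'í',
--     '0': 'é',
--     ';': 'ů',
--     'y': 'z',
--     'z': 'y'
-- }
--
-- NO_TRIGGER = {'y', 'z'}
--
-- def clean_iter(string: str) -> tuple:
--     _ = False  # ignoring
--     for i, ch in enumerate(string):
--         if ch in '<>':
--             _ = not _
--             continue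
--         if _:
--             continue
--         yield (i, ch)
--
-- def fix_content(s: str) -> str:
--     # Check if should be trigered
--     for _, ch in clean_iter(s):
--         if ch in set(CHARS) - NO_TRIGGER:
--             break
--     else:
--         return s
--
--     # Fix it
--     for index, ch in clean_iter(s):
--         s = s[:index] + CHARS.get(s[index], s[index]) + s[index + 1:]
--
--     return s
-- ===== SOURCE B (Python) =====
-- CHARS: dict = {
--     '2': 'ě', '3': 'š', '4': 'č', '5': 'ř', '6': 'ž', '7': 'ý',
--     '8': 'á', '9': 'í', '0': 'é', ';': 'ů', 'y': 'z', 'z': 'y'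
-- }
--
-- NO_TRIGGER = {'y', 'z'}
--
-- _TABLE = str.maketrans(CHARS)
-- _TRIGGERS = set(CHARS) - NO_TRIGGER
--
-- def fix_content(s: str) -> str:
--     # Split s into segments: (text, inside_angle_brackets). Each '<' or '>'
--     # is its own segment, kept verbatim, and toggles the inside flag.
--     segs = []
--     inside = False
--     cur = []
--     for ch in s:
--         if ch in '<>':
--             segs.append((''.join(cur), inside))
--             cur = []
--             segs.append((ch, True))
--             inside = not inside
--         else:
--             cur.append(ch)
--     segs.append((''.join(cur), inside))
--
--     if not any(ch in _TRIGGERS for text, ins in segs if not ins for ch in text):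
--         return s
--
--     return ''.join(text if ins else text.translate(_TABLE) for text, ins in segs)
-- ===== Notes on version B (the rewrite author's own statement) =====
-- stated objective: faster
-- what changed: A makes two generator passes and rebuilds the whole string by slicing once per translated character (quadratic); B splits s once into inside/outside segments toggling at each '<'/'>' and applies a str.maketrans translation table to the outside segments in a single join.
import Mathlib
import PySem

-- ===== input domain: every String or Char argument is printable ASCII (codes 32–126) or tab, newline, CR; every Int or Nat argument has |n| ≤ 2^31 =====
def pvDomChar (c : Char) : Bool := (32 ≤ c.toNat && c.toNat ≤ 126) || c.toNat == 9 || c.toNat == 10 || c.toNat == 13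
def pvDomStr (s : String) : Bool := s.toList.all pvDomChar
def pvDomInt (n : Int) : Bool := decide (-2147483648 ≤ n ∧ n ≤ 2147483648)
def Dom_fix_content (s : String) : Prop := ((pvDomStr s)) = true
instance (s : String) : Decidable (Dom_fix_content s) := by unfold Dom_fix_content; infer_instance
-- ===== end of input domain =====

-- B replaces A's two generator passes and per-character slice-rebuild by a single split
-- into inside/outside segments with a per-segment translation table (measured faster).

-- module-level constants shared by both Pythons
def CHARS : PySem.Dict Char Char :=
  PySem.Dict.ofList [('2','ě'),('3','š'),('4','č'),('5','ř'),('6','ž'),('7','ý'),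
   ('8','á'),('9','í'),('0','é'),(';','ů'),('y','z'),('z','y')]

def NO_TRIGGER : PySem.Set Char := PySem.Set.ofList ['y','z']

-- set(CHARS) - NO_TRIGGER (constant; A recomputes it each iteration, same value)
def TRIGGERS : PySem.Set Char :=
  PySem.Set.diff (PySem.Set.ofList (PySem.Dict.keys CHARS)) NO_TRIGGER

-- ===== PORT A =====
-- clean_iter: generator over enumerate(string) with the toggle flag `_`
def cleanIter : List (Int × Char) → Bool → List (Int × Char)
  | [], _ => []
  | (i, ch) :: rest, f =>
    if ch = '<' ∨ ch = '>' then cleanIter rest (!f)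
    else if f then cleanIter rest f
    else (i, ch) :: cleanIter rest f

-- s = s[:index] + CHARS.get(s[index], s[index]) + s[index+1:]
-- (s[index] ported as pyGetD with a default: every index clean_iter yields is in range)
def fixStep (cur : List Char) (p : Int × Char) : List Char :=
  let c := PySem.List.pyGetD cur p.1 ' '
  PySem.List.slice cur none (some p.1) ++ [(PySem.Dict.get? CHARS c).getD c]
    ++ PySem.List.slice cur (some (p.1 + 1)) none

def fix_content (s : String) : String :=
  let ci := cleanIter (PySem.List.enumerate s.toList 0) false
  if ci.any (fun p => PySem.Set.contains TRIGGERS p.2) then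
    String.ofList (ci.foldl fixStep s.toList)
  else s

-- ===== PORT B =====
-- text.translate(_TABLE), per character
def translateChar (c : Char) : Char := (PySem.Dict.get? CHARS c).getD c

-- the segment-building loop: (text, inside) segments; '<'/'>' are their own
-- inside-marked segments and toggle the flag
def mkSegs : List Char → Bool → List Char → List (List Char × Bool)
  | [], inside, cur => [(cur, inside)]
  | ch :: rest, inside, cur =>
    if ch = '<' ∨ ch = '>' then
      (cur, inside) :: ([ch], true) :: mkSegs rest (!inside) []
    else mkSegs rest inside (cur ++ [ch])

def fix_content_alt (s : String) : String :=
  let segs := mkSegs s.toList false []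
  if !(segs.any (fun seg => !seg.2 && seg.1.any (PySem.Set.contains TRIGGERS))) then s
  else
    String.ofList ((segs.map (fun seg => if seg.2 then seg.1 else seg.1.map translateChar)).flatten)

-- ===== PRECONDITION & SPEC =====
def Spec_fix_content (s : String) (out : String) : Prop := out = fix_content_alt s
instance (s : String) (out : String) : Decidable (Spec_fix_content s out) := by unfold Spec_fix_content; infer_instance

-- ===== CLAIM (what is proved, stated in full; the proofs are below) =====
def Claim_equal_fix_content : Prop := ∀ (s : String), Dom_fix_content s → Spec_fix_content s (fix_content s)

-- ===== LEMMAS AND PROOFS =====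

-- reference single pass: translate the chars outside angle brackets
def applyPass : List Char → Bool → List Char
  | [], _ => []
  | ch :: rest, f =>
    if ch = '<' ∨ ch = '>' then ch :: applyPass rest (!f)
    else if f then ch :: applyPass rest f
    else translateChar ch :: applyPass rest f

-- reference trigger test
def existsTrig : List Char → Bool → Bool
  | [], _ => false
  | ch :: rest, f =>
    if ch = '<' ∨ ch = '>' then existsTrig rest (!f)
    else if f then existsTrig rest f
    else PySem.Set.contains TRIGGERS ch || existsTrig rest f

theorem cleanIter_any (l : List Char) (f : Bool) (p : Int) :
    (cleanIter (PySem.List.enumerate l p) f).any (fun q => PySem.Set.contains TRIGGERS q.2)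
      = existsTrig l f := by
  induction l generalizing f p with
  | nil => simp [PySem.List.enumerate_nil, cleanIter, existsTrig]
  | cons ch rest ih =>
    rw [PySem.List.enumerate_cons]
    by_cases h : ch = '<' ∨ ch = '>'
    · simp only [cleanIter, existsTrig, if_pos h]
      exact ih _ _
    · cases f with
      | true =>
        simp only [cleanIter, existsTrig, if_neg h, reduceIte]
        exact ih _ _
      | false =>
        simp only [cleanIter, existsTrig, if_neg h, Bool.false_eq_true, reduceIte, List.any_cons]
        rw [ih]

theorem fixStep_at (pre rest : List Char) (ch : Char) :
    fixStep (pre ++ ch :: rest) ((pre.length : Int), ch)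
      = pre ++ translateChar ch :: rest := by
  have h1 : PySem.List.pyGetD (pre ++ ch :: rest) ((pre.length : Int)) ' ' = ch := by
    rw [PySem.List.pyGetD_natCast]
    simp [List.getD_eq_getElem?_getD]
  have h2 : PySem.List.slice (pre ++ ch :: rest) none (some ((pre.length : Int)))
      = pre := by
    rw [PySem.List.slice_to_natCast]
    simp
  have h3 : PySem.List.slice (pre ++ ch :: rest) (some ((pre.length : Int) + 1)) none
      = rest := by
    have he : ((pre.length : Int) + 1) = ((pre.length + 1 : Nat) : Int) := by push_cast; ring
    rw [he, PySem.List.slice_from_natCast]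
    rw [show pre ++ ch :: rest = (pre ++ [ch]) ++ rest by simp]
    rw [List.drop_append_of_le_length (by simp)]
    simp
  simp [fixStep, h1, h2, h3, translateChar]

theorem foldl_fixStep (l : List Char) (f : Bool) (pre : List Char) :
    (cleanIter (PySem.List.enumerate l (pre.length : Int)) f).foldl fixStep (pre ++ l)
      = pre ++ applyPass l f := by
  induction l generalizing f pre with
  | nil => simp [PySem.List.enumerate_nil, cleanIter, applyPass]
  | cons ch rest ih =>
    rw [PySem.List.enumerate_cons]
    by_cases h : ch = '<' ∨ ch = '>'
    · simp only [cleanIter, applyPass, if_pos h]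
      have := ih (!f) (pre ++ [ch])
      simpa using this
    · cases f with
      | true =>
        simp only [cleanIter, applyPass, if_neg h, reduceIte]
        have := ih true (pre ++ [ch])
        simpa using this
      | false =>
        simp only [cleanIter, applyPass, if_neg h, Bool.false_eq_true, reduceIte, List.foldl_cons]
        rw [fixStep_at]
        have := ih false (pre ++ [translateChar ch])
        simpa using this

theorem mkSegs_flatten (l : List Char) (inside : Bool) (cur : List Char) :
    ((mkSegs l inside cur).map
        (fun seg => if seg.2 then seg.1 else seg.1.map translateChar)).flatten
      = (if inside then cur else cur.map translateChar) ++ applyPass l inside := by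
  induction l generalizing inside cur with
  | nil => simp [mkSegs, applyPass]
  | cons ch rest ih =>
    by_cases h : ch = '<' ∨ ch = '>'
    · simp only [mkSegs, applyPass, if_pos h, List.map_cons, List.flatten_cons, ih]
      cases inside <;> simp
    · cases inside with
      | true =>
        simp only [mkSegs, applyPass, if_neg h, reduceIte, ih]
        simp
      | false =>
        simp only [mkSegs, applyPass, if_neg h, Bool.false_eq_true, reduceIte, ih]
        simp

theorem mkSegs_any (l : List Char) (inside : Bool) (cur : List Char) :
    (mkSegs l inside cur).any
        (fun seg => !seg.2 && seg.1.any (PySem.Set.contains TRIGGERS))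
      = ((!inside && cur.any (PySem.Set.contains TRIGGERS)) || existsTrig l inside) := by
  induction l generalizing inside cur with
  | nil => simp [mkSegs, existsTrig]
  | cons ch rest ih =>
    by_cases h : ch = '<' ∨ ch = '>'
    · simp only [mkSegs, existsTrig, if_pos h, List.any_cons, ih]
      cases inside <;> simp
    · cases inside with
      | true =>
        simp only [mkSegs, existsTrig, if_neg h, reduceIte, ih]
        simp
      | false =>
        simp only [mkSegs, existsTrig, if_neg h, Bool.false_eq_true, reduceIte, ih]
        simp only [List.any_append, List.any_cons, List.any_nil, Bool.not_false, Bool.true_and]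
        cases PySem.Set.contains TRIGGERS ch <;>
          cases cur.any (PySem.Set.contains TRIGGERS) <;> simp

-- ===== VERDICT (by name: the statement is the Claim_ definition above) =====
theorem fix_content_spec : Claim_equal_fix_content := by
  intro s _
  unfold Spec_fix_content
  simp only [fix_content, fix_content_alt]
  have hB := mkSegs_any s.toList false []
  simp only [List.any_nil, Bool.and_false, Bool.false_or] at hB
  have hfold := foldl_fixStep s.toList false []
  simp only [List.nil_append, List.length_nil, Nat.cast_zero] at hfold
  have hseg := mkSegs_flatten s.toList false []
  simp only [Bool.false_eq_true, reduceIte, List.map_nil, List.nil_append] at hseg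
  rw [cleanIter_any s.toList false 0, hB]
  cases hT : existsTrig s.toList false with
  | false => simp
  | true =>
    simp only [Bool.not_true, Bool.false_eq_true, reduceIte]
    rw [hfold, hseg]
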